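-- pv_equiv track=rewrite | github.com/neozenith/sqlite-muninn | benchmarks/harness/treatments/kg_graphrag.py | _get_relevant_chunks
-- ===== SOURCE A (Python) =====
-- def _get_relevant_chunks(query_chunk_id: int, chunk_entities: dict[int, set[str]]) -> set[int]:
--     """Get chunks that share entities with the query chunk (ground truth for recall)."""
--     query_entities = chunk_entities.get(query_chunk_id, set())
--     if not query_entities:
--         return set()
--
--     relevant = set()
--     for cid, entities in chunk_entities.items():
--         if entities & query_entities:
--             relevant.add(cid)
--     return relevant
-- ===== SOURCE B (Python) =====
-- def _get_relevant_chunks(query_chunk_id: int, chunk_entities: dict[int, set[str]]) -> set[int]: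
--     """Chunks sharing at least one entity with the query chunk, via an inverted index."""
--     # Inverted index: entity -> set of chunk ids mentioning it.
--     index: dict[str, set[int]] = {}
--     for cid, entities in chunk_entities.items():
--         for entity in entities:
--             index.setdefault(entity, set()).add(cid)
--
--     # Union of the index buckets of the query chunk's entities.
--     hits: set[int] = set()
--     for entity in chunk_entities.get(query_chunk_id, set()):
--         hits |= index.get(entity, set())
--     return {cid for cid in chunk_entities if cid in hits}
-- ===== Notes on version B (the rewrite author's own statement) =====
-- stated objective: alternative
-- what changed: B builds an inverted index mapping each entity to the set of chunk ids mentioning it, unions the index buckets of the query chunk's entities, and returns the matching chunk ids, instead of intersecting every chunk's entity set with the query set.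
import Mathlib
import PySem

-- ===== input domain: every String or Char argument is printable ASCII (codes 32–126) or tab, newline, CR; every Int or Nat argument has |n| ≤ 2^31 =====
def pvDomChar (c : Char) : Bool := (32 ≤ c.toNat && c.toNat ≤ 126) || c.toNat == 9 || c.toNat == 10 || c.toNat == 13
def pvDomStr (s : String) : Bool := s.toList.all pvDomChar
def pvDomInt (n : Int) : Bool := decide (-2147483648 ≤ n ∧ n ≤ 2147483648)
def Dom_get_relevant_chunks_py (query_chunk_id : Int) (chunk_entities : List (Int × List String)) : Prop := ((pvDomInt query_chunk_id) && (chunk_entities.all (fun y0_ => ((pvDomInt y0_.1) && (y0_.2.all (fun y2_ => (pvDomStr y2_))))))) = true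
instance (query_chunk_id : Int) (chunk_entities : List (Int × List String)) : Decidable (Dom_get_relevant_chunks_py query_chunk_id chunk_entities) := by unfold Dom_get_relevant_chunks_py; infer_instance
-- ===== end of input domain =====

-- B replaces the per-chunk set intersections by an inverted index (entity -> chunk ids)
-- and a union over the query's entities; alternative decomposition, same asymptotic cost.

-- ===== PORT A =====
def get_relevant_chunks_py (query_chunk_id : Int) (chunk_entities : List (Int × List String)) : List Int :=
  let query_entities : PySem.Set String := (PySem.Dict.mk chunk_entities).getD query_chunk_id []
  if query_entities = [] then []
  else
    chunk_entities.foldl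
      (fun relevant p =>
        if PySem.Set.inter p.2 query_entities ≠ [] then PySem.Set.add relevant p.1 else relevant)
      []

-- ===== PORT B =====
def get_relevant_chunks_py_alt (query_chunk_id : Int) (chunk_entities : List (Int × List String)) : List Int :=
  let index : PySem.Dict String (PySem.Set Int) :=
    chunk_entities.foldl
      (fun d p => p.2.foldl (fun d e => d.modify e [] (fun s => PySem.Set.add s p.1)) d)
      PySem.Dict.empty
  let hits : PySem.Set Int :=
    ((PySem.Dict.mk chunk_entities).getD query_chunk_id []).foldl
      (fun h e => PySem.Set.union h (index.getD e [])) []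
  chunk_entities.foldl
    (fun acc p => if PySem.Set.contains hits p.1 then PySem.Set.add acc p.1 else acc)
    []

-- ===== PRECONDITION & SPEC =====
-- Pre_ only requires distinct keys: an association list with duplicate keys does not
-- represent any Python dict, so no input A accepts is excluded.
def Pre_get_relevant_chunks_py (query_chunk_id : Int) (chunk_entities : List (Int × List String)) : Prop :=
  (chunk_entities.map Prod.fst).Nodup
instance (query_chunk_id : Int) (chunk_entities : List (Int × List String)) : Decidable (Pre_get_relevant_chunks_py query_chunk_id chunk_entities) := by unfold Pre_get_relevant_chunks_py; infer_instance

def pvWitness_get_relevant_chunks_py : Int × (List (Int × List String)) :=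
  (1, [(1, ["a"]), (2, ["a", "b"]), (3, ["c"])])

def Spec_get_relevant_chunks_py (query_chunk_id : Int) (chunk_entities : List (Int × List String)) (out : List Int) : Prop := out = get_relevant_chunks_py_alt query_chunk_id chunk_entities
instance (query_chunk_id : Int) (chunk_entities : List (Int × List String)) (out : List Int) : Decidable (Spec_get_relevant_chunks_py query_chunk_id chunk_entities out) := by unfold Spec_get_relevant_chunks_py; infer_instance

-- ===== CLAIM (what is proved, stated in full; the proofs are below) =====
def Claim_equal_get_relevant_chunks_py : Prop := ∀ (query_chunk_id : Int) (chunk_entities : List (Int × List String)), Dom_get_relevant_chunks_py query_chunk_id chunk_entities → Pre_get_relevant_chunks_py query_chunk_id chunk_entities → Spec_get_relevant_chunks_py query_chunk_id chunk_entities (get_relevant_chunks_py query_chunk_id chunk_entities)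

-- ===== LEMMAS AND PROOFS =====

-- membership in one chunk's inner index-building fold
theorem pv_mem_inner (es : List String) (c : Int) :
    ∀ (d : PySem.Dict String (PySem.Set Int)) (e : String) (cid : Int),
    (cid ∈ (es.foldl (fun d e => d.modify e [] (fun s => PySem.Set.add s c)) d).getD e [])
      ↔ cid ∈ d.getD e [] ∨ (cid = c ∧ e ∈ es) := by
  induction es with
  | nil => intro d e cid; simp [List.foldl]
  | cons e' es ih =>
    intro d e cid
    simp only [List.foldl_cons]
    rw [ih]
    rw [PySem.Dict.getD_modify]
    by_cases h : e = e'
    · simp [h, PySem.Set.mem_add]; tauto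
    · simp [h]

-- membership in the full inverted index
theorem pv_mem_index (ce : List (Int × List String)) :
    ∀ (d : PySem.Dict String (PySem.Set Int)) (e : String) (cid : Int),
    (cid ∈ (ce.foldl (fun d p => p.2.foldl (fun d e => d.modify e [] (fun s => PySem.Set.add s p.1)) d) d).getD e [])
      ↔ cid ∈ d.getD e [] ∨ ∃ p ∈ ce, p.1 = cid ∧ e ∈ p.2 := by
  induction ce with
  | nil => intro d e cid; simp [List.foldl]
  | cons p ce ih =>
    intro d e cid
    simp only [List.foldl_cons]
    rw [ih, pv_mem_inner]
    simp only [List.mem_cons]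
    constructor
    · rintro ((h | ⟨rfl, he⟩) | ⟨q, hq, h1, h2⟩)
      · exact Or.inl h
      · exact Or.inr ⟨p, Or.inl rfl, rfl, he⟩
      · exact Or.inr ⟨q, Or.inr hq, h1, h2⟩
    · rintro (h | ⟨q, (rfl | hq), h1, h2⟩)
      · exact Or.inl (Or.inl h)
      · exact Or.inl (Or.inr ⟨h1.symm, h2⟩)
      · exact Or.inr ⟨q, hq, h1, h2⟩

-- membership in the union accumulated over the query's entities
theorem pv_mem_hits (index : PySem.Dict String (PySem.Set Int)) (qe : List String) :
    ∀ (h0 : PySem.Set Int) (cid : Int),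
    (cid ∈ qe.foldl (fun h e => PySem.Set.union h (index.getD e [])) h0)
      ↔ cid ∈ h0 ∨ ∃ e ∈ qe, cid ∈ index.getD e [] := by
  induction qe with
  | nil => intro h0 cid; simp [List.foldl]
  | cons e qe ih =>
    intro h0 cid
    simp only [List.foldl_cons]
    rw [ih]
    rw [PySem.Set.mem_union]
    simp only [List.mem_cons]
    constructor
    · rintro ((h | h) | ⟨e', he', h⟩)
      · exact Or.inl h
      · exact Or.inr ⟨e, Or.inl rfl, h⟩
      · exact Or.inr ⟨e', Or.inr he', h⟩
    · rintro (h | ⟨e', (rfl | he'), h⟩)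
      · exact Or.inl (Or.inl h)
      · exact Or.inl (Or.inr h)
      · exact Or.inr ⟨e', he', h⟩

-- with distinct keys, two pairs of the list sharing a key are the same pair
theorem pv_nodup_key_eq {ce : List (Int × List String)}
    (hnd : (ce.map Prod.fst).Nodup) :
    ∀ {p q : Int × List String}, p ∈ ce → q ∈ ce → p.1 = q.1 → p = q := by
  induction ce with
  | nil => intro p q hp; simp at hp
  | cons r ce ih =>
    simp only [List.map_cons, List.nodup_cons] at hnd
    intro p q hp hq h1
    rcases List.mem_cons.mp hp with rfl | hp'
    · rcases List.mem_cons.mp hq with rfl | hq'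
      · rfl
      · exact absurd (show p.1 ∈ ce.map Prod.fst by
          rw [h1]; exact List.mem_map_of_mem hq') hnd.1
    · rcases List.mem_cons.mp hq with rfl | hq'
      · exact absurd (show q.1 ∈ ce.map Prod.fst by
          rw [← h1]; exact List.mem_map_of_mem hp') hnd.1
      · exact ih hnd.2 hp' hq' h1

-- the filtering fold over an empty hit set returns the empty list
theorem pv_foldl_nil_hits (ce : List (Int × List String)) :
    ce.foldl
      (fun acc p => if PySem.Set.contains ([] : PySem.Set Int) p.1 then PySem.Set.add acc p.1 else acc)
      ([] : List Int) = [] := by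
  induction ce with
  | nil => rfl
  | cons p ce ih =>
    simp only [List.foldl_cons]
    have h : PySem.Set.contains ([] : PySem.Set Int) p.1 = false := rfl
    rw [h]
    exact ih

-- characterisation of the intersection test: nonempty iff a shared element exists
theorem pv_inter_ne_nil (s t : List String) :
    PySem.Set.inter s t ≠ [] ↔ ∃ x ∈ s, x ∈ t := by
  rw [← List.isEmpty_eq_false_iff, List.isEmpty_eq_false_iff_exists_mem]
  constructor
  · rintro ⟨x, hx⟩
    exact ⟨x, (PySem.Set.mem_inter _ _ _).mp hx⟩
  · rintro ⟨x, hs, ht⟩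
    exact ⟨x, (PySem.Set.mem_inter _ _ _).mpr ⟨hs, ht⟩⟩

-- ===== VERDICT (by name: the statement is the Claim_ definition above) =====
theorem get_relevant_chunks_py_spec : Claim_equal_get_relevant_chunks_py := by
  intro qid ce _ hpre
  show get_relevant_chunks_py qid ce = get_relevant_chunks_py_alt qid ce
  unfold get_relevant_chunks_py get_relevant_chunks_py_alt
  dsimp only
  by_cases hq : (PySem.Dict.mk ce).getD qid ([] : List String) = []
  · rw [if_pos hq, hq]
    exact (pv_foldl_nil_hits ce).symm
  · rw [if_neg hq]
    apply PySem.List.foldl_congr_mem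
    intro acc p hp
    have hcond :
        (PySem.Set.contains
          (((PySem.Dict.mk ce).getD qid []).foldl
            (fun h e => PySem.Set.union h
              ((ce.foldl (fun d p => p.2.foldl (fun d e => d.modify e [] (fun s => PySem.Set.add s p.1)) d) PySem.Dict.empty).getD e []))
            []) p.1 = true)
        ↔ PySem.Set.inter p.2 ((PySem.Dict.mk ce).getD qid []) ≠ [] := by
      rw [PySem.Set.contains_iff, pv_mem_hits, pv_inter_ne_nil]
      constructor
      · rintro (h | ⟨e, he, hmem⟩)
        · simp at h
        · rw [pv_mem_index] at hmem
          rcases hmem with h | ⟨p', hp', h1, h2⟩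
          · simp [PySem.Dict.getD_empty] at h
          · have : p' = p := pv_nodup_key_eq hpre hp' hp h1
            subst this
            exact ⟨e, h2, he⟩
      · rintro ⟨x, hxp, hxq⟩
        refine Or.inr ⟨x, hxq, ?_⟩
        rw [pv_mem_index]
        exact Or.inr ⟨p, hp, rfl, hxp⟩
    by_cases hc : PySem.Set.inter p.2 ((PySem.Dict.mk ce).getD qid []) ≠ []
    · rw [if_pos hc, if_pos (hcond.mpr hc)]
    · rw [if_neg hc, if_neg (fun h => hc (hcond.mp h))]
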